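-- pv_equiv track=rewrite | github.com/nikhil95050/Antigravity | clients/telegram_helpers.py | build_question_keyboard
-- ===== SOURCE A (Python) =====
-- def build_question_keyboard(q_key: str, options: list, selected: list = None, show_skip=True, show_done=False) -> dict:
--     keyboard = []
--     selected = selected or []
--     row = []
--     for opt in options:
--         label = f"✅ {opt}" if opt in selected else opt
--         row.append({"text": label, "callback_data": f"q_{q_key}_{opt}"})
--         if len(row) == 2:
--             keyboard.append(row)
--             row = []
--     if row: keyboard.append(row)
--     controls = []
--     if show_skip: controls.append({"text": "Skip ⏭️", "callback_data": f"q_skip_{q_key}"})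
--     if show_done: controls.append({"text": "Done ✅", "callback_data": f"q_done_{q_key}"})
--     if controls: keyboard.append(controls)
--     return {"inline_keyboard": keyboard}
-- ===== SOURCE B (Python) =====
-- def build_question_keyboard(q_key: str, options: list, selected: list = None, show_skip=True, show_done=False) -> dict:
--     selected = selected or []
--     # Phase 1: build the flat list of option buttons.
--     buttons = [{"text": f"✅ {opt}" if opt in selected else opt,
--                 "callback_data": f"q_{q_key}_{opt}"} for opt in options]
--     # Phase 2: group the flat list into rows of two.
--     keyboard = []
--     rest = buttons
--     while rest:
--         keyboard.append(rest[:2])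
--         rest = rest[2:]
--     controls = []
--     if show_skip: controls.append({"text": "Skip ⏭️", "callback_data": f"q_skip_{q_key}"})
--     if show_done: controls.append({"text": "Done ✅", "callback_data": f"q_done_{q_key}"})
--     if controls: keyboard.append(controls)
--     return {"inline_keyboard": keyboard}
-- ===== Notes on version B (the rewrite author's own statement) =====
-- stated objective: alternative
-- what changed: B replaces A's single loop that interleaves button creation with row bookkeeping (mutable row buffer flushed at length 2) by two separate phases: build the flat button list in one comprehension, then chunk it into rows of two by repeated slicing.
import Mathlib
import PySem

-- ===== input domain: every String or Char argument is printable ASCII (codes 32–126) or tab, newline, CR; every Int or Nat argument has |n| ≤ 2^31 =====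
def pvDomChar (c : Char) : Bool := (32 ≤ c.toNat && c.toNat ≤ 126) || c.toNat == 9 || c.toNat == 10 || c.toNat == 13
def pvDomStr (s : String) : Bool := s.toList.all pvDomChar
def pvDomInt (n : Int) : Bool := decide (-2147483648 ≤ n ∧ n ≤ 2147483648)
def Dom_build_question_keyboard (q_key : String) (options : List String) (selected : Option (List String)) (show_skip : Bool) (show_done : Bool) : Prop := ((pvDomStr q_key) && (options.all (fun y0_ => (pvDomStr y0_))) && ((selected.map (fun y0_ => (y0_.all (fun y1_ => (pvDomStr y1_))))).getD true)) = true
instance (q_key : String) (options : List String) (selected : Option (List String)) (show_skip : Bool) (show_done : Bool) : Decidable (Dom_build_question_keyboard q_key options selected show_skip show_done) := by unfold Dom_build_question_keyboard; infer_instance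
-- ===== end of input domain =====

-- ===== PORT A =====
-- B replaces A's interleaved button-building/row-flushing loop by two phases:
-- build the flat button list, then chunk it into rows of two (alternative decomposition).
-- shared helper: the option-button dict {"text": label, "callback_data": f"q_{q_key}_{opt}"}
def bqkMk (q_key : String) (sel : List String) (opt : String) : List (String × String) :=
  [("text", if sel.contains opt then "✅ " ++ opt else opt),
   ("callback_data", "q_" ++ q_key ++ "_" ++ opt)]

-- shared helper: the controls row (Skip/Done appended under their guards)
def bqkControls (q_key : String) (show_skip : Bool) (show_done : Bool) : List (List (String × String)) :=
  (if show_skip then [[("text", "Skip ⏭️"), ("callback_data", "q_skip_" ++ q_key)]] else []) ++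
  (if show_done then [[("text", "Done ✅"), ("callback_data", "q_done_" ++ q_key)]] else [])

-- A's loop body: append the button to the row, flush the row when it reaches length 2
def bqkStep (q_key : String) (sel : List String)
    (st : List (List (List (String × String))) × List (List (String × String)))
    (opt : String) : List (List (List (String × String))) × List (List (String × String)) :=
  let row := st.2 ++ [bqkMk q_key sel opt]
  if row.length = 2 then (st.1 ++ [row], []) else (st.1, row)

def build_question_keyboard (q_key : String) (options : List String) (selected : Option (List String)) (show_skip : Bool) (show_done : Bool) : List (String × List (List (List (String × String)))) :=
  let sel := match selected with | none => [] | some l => l   -- selected = selected or []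
  let st := options.foldl (bqkStep q_key sel) ([], [])
  let keyboard := if st.2 = [] then st.1 else st.1 ++ [st.2]  -- if row: keyboard.append(row)
  let controls := bqkControls q_key show_skip show_done
  let keyboard := if controls = [] then keyboard else keyboard ++ [controls]
  [("inline_keyboard", keyboard)]

-- ===== PORT B =====
-- B's while loop: keyboard.append(rest[:2]); rest = rest[2:]  (slices on nonneg indices = take/drop)
def bqkChunk2 {α : Type} : List α → List (List α)
  | [] => []
  | a :: t => (a :: t).take 2 :: bqkChunk2 ((a :: t).drop 2)
  termination_by xs => xs.length
  decreasing_by simp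

def build_question_keyboard_alt (q_key : String) (options : List String) (selected : Option (List String)) (show_skip : Bool) (show_done : Bool) : List (String × List (List (List (String × String)))) :=
  let sel := match selected with | none => [] | some l => l
  let buttons := options.map (bqkMk q_key sel)
  let keyboard := bqkChunk2 buttons
  let controls := bqkControls q_key show_skip show_done
  let keyboard := if controls = [] then keyboard else keyboard ++ [controls]
  [("inline_keyboard", keyboard)]

-- ===== PRECONDITION & SPEC =====
def Spec_build_question_keyboard (q_key : String) (options : List String) (selected : Option (List String)) (show_skip : Bool) (show_done : Bool) (out : List (String × List (List (List (String × String))))) : Prop := out = build_question_keyboard_alt q_key options selected show_skip show_done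
instance (q_key : String) (options : List String) (selected : Option (List String)) (show_skip : Bool) (show_done : Bool) (out : List (String × List (List (List (String × String))))) : Decidable (Spec_build_question_keyboard q_key options selected show_skip show_done out) := by unfold Spec_build_question_keyboard; infer_instance

-- ===== CLAIM (what is proved, stated in full; the proofs are below) =====
def Claim_equal_build_question_keyboard : Prop := ∀ (q_key : String) (options : List String) (selected : Option (List String)) (show_skip : Bool) (show_done : Bool), Dom_build_question_keyboard q_key options selected show_skip show_done → Spec_build_question_keyboard q_key options selected show_skip show_done (build_question_keyboard q_key options selected show_skip show_done)

-- ===== LEMMAS AND PROOFS =====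
-- unfolding equations for bqkChunk2 (well-founded recursion, so stated as lemmas)
theorem bqkChunk2_nil {α : Type} : bqkChunk2 ([] : List α) = [] := by
  rw [bqkChunk2]

theorem bqkChunk2_one {α : Type} (a : α) : bqkChunk2 [a] = [[a]] := by
  rw [bqkChunk2]; simp [bqkChunk2_nil]

theorem bqkChunk2_cons2 {α : Type} (a b : α) (t : List α) :
    bqkChunk2 (a :: b :: t) = [a, b] :: bqkChunk2 t := by
  rw [bqkChunk2]; simp

-- A's fold (with the final partial-row flush) produces exactly the chunks of the mapped button list.
theorem bqkLoop (q_key : String) (sel : List String) :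
    ∀ (opts : List String) (kb : List (List (List (String × String)))),
      (let st := opts.foldl (bqkStep q_key sel) (kb, [])
       if st.2 = [] then st.1 else st.1 ++ [st.2]) =
      kb ++ bqkChunk2 (opts.map (bqkMk q_key sel))
  | [], kb => by simp [bqkChunk2_nil]
  | [a], kb => by simp [bqkStep, bqkChunk2_one]
  | a :: b :: t, kb => by
    have ih := bqkLoop q_key sel t (kb ++ [[bqkMk q_key sel a, bqkMk q_key sel b]])
    simp only [List.foldl_cons, bqkStep, List.nil_append, List.length_cons,
      List.length_nil] at ih ⊢
    simp only [List.map_cons, bqkChunk2_cons2] at ih ⊢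
    simpa using ih

-- ===== VERDICT (by name: the statement is the Claim_ definition above) =====
theorem build_question_keyboard_spec : Claim_equal_build_question_keyboard := by
  intro q_key options selected show_skip show_done _
  unfold Spec_build_question_keyboard build_question_keyboard build_question_keyboard_alt
  simp only []
  rw [bqkLoop]
  simp only [List.nil_append]
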